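-- pv_equiv track=rewrite | github.com/sslim-aidrug/MARBLE | infrastructure/mcp_server_containers/drp-vis/src/utils/atc_parser.py | get_atc_hierarchy_dict
-- ===== SOURCE A (Python) =====
-- from typing import Optional
--
-- def parse_atc_level(atc_code: str, level: int = 5) -> Optional[str]:
--     """
--     Extract ATC code at specified hierarchical level
--
--     Args:
--         atc_code: Full ATC code (e.g., "L01XE01")
--         level: Hierarchical level (1-5)
--                1 = Anatomical (1 char)
--                2 = Therapeutic (3 chars)
--                3 = Pharmacological (4 chars)
--                4 = Chemical (5 chars)
--                5 = Substance (7 chars, full code)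
--
--     Returns:
--         ATC code at specified level, or None if invalid
--
--     Examples:
--         >>> parse_atc_level("L01XE01", 1)
--         "L"
--         >>> parse_atc_level("L01XE01", 2)
--         "L01"
--         >>> parse_atc_level("L01XE01", 4)
--         "L01XE"
--         >>> parse_atc_level("L01XE01", 5)
--         "L01XE01"
--     """
--     if not isinstance(atc_code, str) or not atc_code:
--         return None
--
--     # Define character positions for each level
--     level_length = {
--         1: 1,   # L
--         2: 3,   # L01
--         3: 4,   # L01X
--         4: 5,   # L01XE
--         5: 7    # L01XE01 (or variable length for full code)
--     }
--
--     if level not in level_length: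
--         return None
--
--     # For level 5, return full code
--     if level == 5:
--         return atc_code
--
--     # For other levels, slice to appropriate length
--     target_length = level_length[level]
--     if len(atc_code) < target_length:
--         return None
--
--     return atc_code[:target_length]
--
-- def get_atc_hierarchy_dict(atc_codes: list) -> dict:
--     """
--     Build hierarchical dictionary from list of ATC codes
--
--     Args:
--         atc_codes: List of ATC codes
--
--     Returns:
--         Nested dictionary representing hierarchy
--
--     Example:
--         >>> codes = ['L01XE01', 'L01XE03', 'L01BC02']
--         >>> hierarchy = get_atc_hierarchy_dict(codes)
--         >>> hierarchy['L']['L01']['L01X']['L01XE']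
--         ['L01XE01', 'L01XE03']
--     """
--     hierarchy = {}
--
--     for code in atc_codes:
--         if not isinstance(code, str) or not code:
--             continue
--
--         # Parse all levels
--         l1 = parse_atc_level(code, 1)
--         l2 = parse_atc_level(code, 2)
--         l3 = parse_atc_level(code, 3)
--         l4 = parse_atc_level(code, 4)
--         l5 = code
--
--         # Build nested structure
--         if l1 not in hierarchy:
--             hierarchy[l1] = {}
--         if l2 not in hierarchy[l1]:
--             hierarchy[l1][l2] = {}
--         if l3 not in hierarchy[l1][l2]:
--             hierarchy[l1][l2][l3] = {}
--         if l4 not in hierarchy[l1][l2][l3]: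
--             hierarchy[l1][l2][l3][l4] = []
--
--         hierarchy[l1][l2][l3][l4].append(l5)
--
--     return hierarchy
-- ===== SOURCE B (Python) =====
-- from typing import Optional
--
-- def parse_atc_level(atc_code: str, level: int = 5) -> Optional[str]:
--     """Extract ATC code at specified hierarchical level (same helper as the module's)."""
--     if not isinstance(atc_code, str) or not atc_code:
--         return None
--     level_length = {1: 1, 2: 3, 3: 4, 4: 5, 5: 7}
--     if level not in level_length:
--         return None
--     if level == 5:
--         return atc_code
--     target_length = level_length[level]
--     if len(atc_code) < target_length:
--         return None
--     return atc_code[:target_length]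
--
-- def get_atc_hierarchy_dict(atc_codes: list) -> dict:
--     """Build the ATC hierarchy by recursive order-preserving group-by instead of
--     in-place nested dict insertion."""
--     codes = [c for c in atc_codes if isinstance(c, str) and c]
--
--     def group(items, level):
--         out = {}
--         for c in items:
--             out.setdefault(parse_atc_level(c, level), []).append(c)
--         return out
--
--     return {k1: {k2: {k3: group(g3, 4)
--                       for k3, g3 in group(g2, 3).items()}
--                  for k2, g2 in group(g1, 2).items()}
--             for k1, g1 in group(codes, 1).items()}
-- ===== Notes on version B (the rewrite author's own statement) =====
-- stated objective: simpler
-- what changed: B replaces A's per-code unrolled in-place nested-dict insertion (four if-not-in/assign steps) with a recursive order-preserving group-by: one generic group helper applied at levels 1-4 inside nested dict comprehensions.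
import Mathlib
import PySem

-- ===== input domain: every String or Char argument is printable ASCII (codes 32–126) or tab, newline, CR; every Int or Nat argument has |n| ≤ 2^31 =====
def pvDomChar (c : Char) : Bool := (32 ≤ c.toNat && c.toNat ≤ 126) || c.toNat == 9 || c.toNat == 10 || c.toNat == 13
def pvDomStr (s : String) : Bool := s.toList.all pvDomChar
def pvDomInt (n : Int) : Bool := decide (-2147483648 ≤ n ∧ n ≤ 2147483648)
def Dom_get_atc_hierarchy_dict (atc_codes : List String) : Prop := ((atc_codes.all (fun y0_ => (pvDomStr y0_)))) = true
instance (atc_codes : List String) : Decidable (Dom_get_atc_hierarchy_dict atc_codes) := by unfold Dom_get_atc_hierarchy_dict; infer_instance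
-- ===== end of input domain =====

-- B builds the same hierarchy by a recursive order-preserving group-by (one generic
-- group helper at prefix lengths 1/3/4/5) instead of A's unrolled in-place nested
-- dict insertion; objective: simpler.

-- ===== PORT A =====
-- parse_atc_level, transliterated (level is always an int here; the isinstance check
-- is vacuous for String input and drops to the emptiness test).
def parse_atc_level (atc_code : String) (level : Int) : Option String :=
  if atc_code.toList = [] then none
  else
    let level_length : PySem.Dict Int Int :=
      PySem.Dict.ofList [(1, 1), (2, 3), (3, 4), (4, 5), (5, 7)]
    if ¬ (level_length.contains level = true) then none
    else if level = 5 then some atc_code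
    else
      -- level_length[level]: key present (checked above), so getD's default is unreachable
      let target_length := level_length.getD level 0
      if (atc_code.toList.length : Int) < target_length then none
      else some (String.mk (PySem.List.slice atc_code.toList none (some target_length)))

-- A's loop body keeps the four `if lk not in …` / assignment steps, each ported as
-- insert-if-absent followed by an in-place update of that entry (Python's mutation
-- of hierarchy[l1][…] is the corresponding Dict.modify at that key).  When some
-- level is None the Python dict gets a None key, which the result type List (String × …)
-- cannot represent; Pre_ excludes those inputs and the port skips such a code there.
def get_atc_hierarchy_dict (atc_codes : List String) :
    List (String × List (String × List (String × List (String × List String)))) :=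
  let hierarchy :
      PySem.Dict String (PySem.Dict String (PySem.Dict String (PySem.Dict String (List String)))) :=
    atc_codes.foldl
      (fun h code =>
        if code = "" then h  -- `if not isinstance(code, str) or not code: continue`
        else
          match parse_atc_level code 1, parse_atc_level code 2,
                parse_atc_level code 3, parse_atc_level code 4 with
          | some l1, some l2, some l3, some l4 =>
            let l5 := code
            let h' := if h.contains l1 then h else h.insert l1 PySem.Dict.empty
            h'.modify l1 PySem.Dict.empty (fun d2 =>
              let d2' := if d2.contains l2 then d2 else d2.insert l2 PySem.Dict.empty
              d2'.modify l2 PySem.Dict.empty (fun d3 =>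
                let d3' := if d3.contains l3 then d3 else d3.insert l3 PySem.Dict.empty
                d3'.modify l3 PySem.Dict.empty (fun d4 =>
                  let d4' := if d4.contains l4 then d4 else d4.insert l4 []
                  d4'.modify l4 [] (fun lst => lst ++ [l5]))))
          | _, _, _, _ => h)  -- None key: outside Pre_, nothing claimed
      PySem.Dict.empty
  hierarchy.items.map (fun p1 =>
    (p1.1, p1.2.items.map (fun p2 =>
      (p2.1, p2.2.items.map (fun p3 =>
        (p3.1, p3.2.items))))))

-- ===== PORT B =====
-- Source B's `group(items, level)`: out.setdefault(parse_atc_level(c, level), []).append(c)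
-- = modify key [] (· ++ [c]); keys are Optional[str] exactly as in Source B
def pvGroupBO (level : Int) (items : List String) : PySem.Dict (Option String) (List String) :=
  items.foldl (fun out c => out.modify (parse_atc_level c level) [] (fun l => l ++ [c]))
    PySem.Dict.empty

-- marshalling of a Source B dict key to the String-keyed result type; a None key is not
-- representable there (Pre_ excludes the inputs that produce one)
def pvKeyStr : Option String → String
  | some s => s
  | none => ""

def get_atc_hierarchy_dict_alt (atc_codes : List String) :
    List (String × List (String × List (String × List (String × List String)))) :=
  let codes := atc_codes.filter (fun c => ¬ (c = ""))
  (pvGroupBO 1 codes).items.map (fun p1 =>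
    (pvKeyStr p1.1, (pvGroupBO 2 p1.2).items.map (fun p2 =>
      (pvKeyStr p2.1, (pvGroupBO 3 p2.2).items.map (fun p3 =>
        (pvKeyStr p3.1, (pvGroupBO 4 p3.2).items.map (fun q =>
          (pvKeyStr q.1, q.2))))))))

-- ===== PRECONDITION & SPEC =====
-- Pre_ excludes lists holding a nonempty code shorter than 5 characters: there A's
-- hierarchy acquires None keys (parse_atc_level returns None for some level), a dict
-- whose keys are not all strings and hence not a value of the ported result type.
def Pre_get_atc_hierarchy_dict (atc_codes : List String) : Prop :=
  -- admitted examples: ["L01XE01", "L01BC02", "N02BA01", "A10BA02", "J01CA04", "abcde", "zz9zz9"]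
  ∀ c ∈ atc_codes, c = "" ∨ 5 ≤ c.toList.length
instance (atc_codes : List String) : Decidable (Pre_get_atc_hierarchy_dict atc_codes) := by
  unfold Pre_get_atc_hierarchy_dict; infer_instance

def pvWitness_get_atc_hierarchy_dict : List String := ["L01XE01", "L01XE03", "L01BC02", ""]

def Spec_get_atc_hierarchy_dict (atc_codes : List String)
    (out : List (String × List (String × List (String × List (String × List String))))) : Prop :=
  out = get_atc_hierarchy_dict_alt atc_codes
instance (atc_codes : List String)
    (out : List (String × List (String × List (String × List (String × List String))))) :
    Decidable (Spec_get_atc_hierarchy_dict atc_codes out) := by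
  unfold Spec_get_atc_hierarchy_dict
  haveI h1 : DecidableEq (List (String × List String)) := inferInstance
  haveI h2 : DecidableEq (List (String × List (String × List String))) := inferInstance
  haveI h3 : DecidableEq (List (String × List (String × List (String × List String)))) := inferInstance
  infer_instance

-- ===== CLAIM (what is proved, stated in full; the proofs are below) =====
def Claim_equal_get_atc_hierarchy_dict : Prop :=
  ∀ (atc_codes : List String), Dom_get_atc_hierarchy_dict atc_codes →
    Pre_get_atc_hierarchy_dict atc_codes →
      Spec_get_atc_hierarchy_dict atc_codes (get_atc_hierarchy_dict atc_codes)

-- ===== LEMMAS AND PROOFS =====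

-- the same groups with their String keys (the form the A-side fold reaches under Pre_)
def pvGroupB (n : Nat) (items : List String) : PySem.Dict String (List String) :=
  items.foldl (fun out c => out.modify (String.mk (c.toList.take n)) [] (fun l => l ++ [c]))
    PySem.Dict.empty

-- map-the-values of a dict of groups
def pvMapV {ν : Type} (d : PySem.Dict String (List String)) (f : List String → ν) :
    PySem.Dict String ν :=
  PySem.Dict.mk (d.items.map (fun p => (p.1, f p.2)))

theorem pvMapV_contains {ν : Type} (d : PySem.Dict String (List String)) (f : List String → ν)
    (k : String) : (pvMapV d f).contains k = d.contains k := by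
  simp [pvMapV, PySem.Dict.contains, List.any_map, Function.comp_def]

theorem pvMapV_get? {ν : Type} (d : PySem.Dict String (List String)) (f : List String → ν)
    (k : String) : (pvMapV d f).get? k = (d.get? k).map f := by
  simp only [pvMapV, PySem.Dict.get?, List.find?_map]
  have hp : ((fun p : String × ν => p.1 == k) ∘ fun p : String × List String => (p.1, f p.2))
      = (fun p => p.1 == k) := by funext p; rfl
  rw [hp]
  cases List.find? (fun p => p.1 == k) d.items <;> rfl

theorem pvMapV_insert {ν : Type} (d : PySem.Dict String (List String)) (f : List String → ν)
    (k : String) (v : List String) :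
    pvMapV (d.insert k v) f = (pvMapV d f).insert k (f v) := by
  have hc := pvMapV_contains d f k
  simp only [PySem.Dict.insert, hc]
  by_cases h : d.contains k = true
  · simp only [h, if_pos]
    apply PySem.Dict.ext
    simp only [pvMapV, List.map_map]
    apply List.map_congr_left
    intro p _
    by_cases hk : p.1 = k <;> simp [hk]
  · simp only [h, Bool.false_eq_true, if_false]
    apply PySem.Dict.ext
    simp [pvMapV, List.map_append]

theorem pvMapV_modify {ν : Type} (d : PySem.Dict String (List String)) (f : List String → ν)
    (e0 : ν) (h0 : f [] = e0) (k c : String) (step : ν → ν)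
    (hstep : ∀ v : List String, step (f v) = f (v ++ [c])) :
    (pvMapV d f).modify k e0 step = pvMapV (d.modify k [] (fun l => l ++ [c])) f := by
  simp only [PySem.Dict.modify, pvMapV_insert]
  congr 1
  rw [← hstep]
  congr 1
  simp only [PySem.Dict.getD, pvMapV_get?]
  cases d.get? k <;> simp [h0]

-- generic level lemma: a fold keyed by the length-n prefix with inner step `step`
-- is the group-by at length n with the inner builder mapped over the groups
theorem pvFoldLevel {ν : Type} (n : Nat) (e0 : ν) (step : String → ν → ν)
    (build : List String → ν) (h0 : build [] = e0)
    (hs : ∀ g c, build (g ++ [c]) = step c (build g)) (g : List String) :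
    g.foldl (fun d c => d.modify (String.mk (c.toList.take n)) e0 (step c)) PySem.Dict.empty
      = pvMapV (pvGroupB n g) build := by
  induction g using List.reverseRecOn with
  | nil => simp [pvGroupB, pvMapV, PySem.Dict.empty]
  | append_singleton g c ih =>
      rw [List.foldl_append, List.foldl_cons, List.foldl_nil, ih,
        pvMapV_modify _ _ _ h0 _ c _ (fun v => (hs v c).symm)]
      simp [pvGroupB, List.foldl_append]

-- the nested builders (B's hierarchy, dict-valued)
def pvB4 (g : List String) : PySem.Dict String (List String) := pvGroupB 5 g
def pvB3 (g : List String) : PySem.Dict String (PySem.Dict String (List String)) :=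
  pvMapV (pvGroupB 4 g) pvB4
def pvB2 (g : List String) :
    PySem.Dict String (PySem.Dict String (PySem.Dict String (List String))) :=
  pvMapV (pvGroupB 3 g) pvB3

theorem pvGroupB_snoc (n : Nat) (g : List String) (c : String) :
    pvGroupB n (g ++ [c])
      = (pvGroupB n g).modify (String.mk (c.toList.take n)) [] (fun l => l ++ [c]) := by
  simp [pvGroupB, List.foldl_append]

theorem pvB4_snoc (g : List String) (c : String) :
    pvB4 (g ++ [c]) = (pvB4 g).modify (String.mk (c.toList.take 5)) [] (fun l => l ++ [c]) := by
  simp [pvB4, pvGroupB, List.foldl_append]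

theorem pvB3_snoc (g : List String) (c : String) :
    pvB3 (g ++ [c]) = (pvB3 g).modify (String.mk (c.toList.take 4)) PySem.Dict.empty
      (fun d => d.modify (String.mk (c.toList.take 5)) [] (fun l => l ++ [c])) := by
  rw [pvB3, pvGroupB_snoc,
    ← pvMapV_modify (pvGroupB 4 g) pvB4 PySem.Dict.empty rfl _ c
      (fun d => d.modify (String.mk (c.toList.take 5)) [] (fun l => l ++ [c]))
      (fun v => (pvB4_snoc v c).symm)]
  rfl

theorem pvB2_snoc (g : List String) (c : String) :
    pvB2 (g ++ [c]) = (pvB2 g).modify (String.mk (c.toList.take 3)) PySem.Dict.empty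
      (fun d3 => d3.modify (String.mk (c.toList.take 4)) PySem.Dict.empty
        (fun d4 => d4.modify (String.mk (c.toList.take 5)) [] (fun l => l ++ [c]))) := by
  rw [pvB2, pvGroupB_snoc,
    ← pvMapV_modify (pvGroupB 3 g) pvB3 PySem.Dict.empty rfl _ c
      (fun d3 => d3.modify (String.mk (c.toList.take 4)) PySem.Dict.empty
        (fun d4 => d4.modify (String.mk (c.toList.take 5)) [] (fun l => l ++ [c])))
      (fun v => (pvB3_snoc v c).symm)]
  rfl

-- insert-if-absent then update at that key is a single modify
theorem insert_absent_modify {ν : Type} (d : PySem.Dict String ν) (k : String) (e0 : ν)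
    (f : ν → ν) :
    (if d.contains k then d else d.insert k e0).modify k e0 f = d.modify k e0 f := by
  by_cases h : d.contains k = true
  · simp [h]
  · have hf : d.contains k = false := by simpa using h
    simp only [h, Bool.false_eq_true, if_false]
    unfold PySem.Dict.modify
    rw [PySem.Dict.getD_insert_self, PySem.Dict.getD_of_not_contains _ e0 hf]
    have hnk : ∀ p ∈ d.items, (p.1 == k) = false := by
      intro p hp
      rw [beq_eq_false_iff_ne]
      intro hpk
      apply h
      simp only [PySem.Dict.contains, List.any_eq_true]
      exact ⟨p, hp, by simp [hpk]⟩
    have hid : List.map (fun p => if (p.1 == k) = true then (k, f e0) else p) d.items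
        = d.items := by
      conv_rhs => rw [← List.map_id d.items]
      apply List.map_congr_left
      intro p hp
      simp [hnk p hp]
    apply PySem.Dict.ext
    simp only [PySem.Dict.insert, h, Bool.false_eq_true, if_false,
      List.map_append, hid]
    simp

-- parse_atc_level on codes of length ≥ 5 returns the prefix of the level's length
theorem parse_eq (c : String) (h5 : 5 ≤ c.toList.length) :
    parse_atc_level c 1 = some (String.mk (c.toList.take 1)) ∧
    parse_atc_level c 2 = some (String.mk (c.toList.take 3)) ∧
    parse_atc_level c 3 = some (String.mk (c.toList.take 4)) ∧
    parse_atc_level c 4 = some (String.mk (c.toList.take 5)) := by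
  have hne : ¬ (c.toList = []) := by
    intro h; rw [h] at h5; simp at h5
  refine ⟨?_, ?_, ?_, ?_⟩ <;>
  · rw [parse_atc_level.eq_def]
    rw [if_neg hne]
    norm_num [PySem.Dict.ofList, PySem.Dict.update, PySem.Dict.insert, PySem.Dict.empty,
      PySem.Dict.contains, PySem.Dict.getD, PySem.Dict.get?, PySem.List.slice]
    have hl : c.length = c.toList.length := String.length_toList.symm
    refine ⟨?_, by congr 1; congr 1; omega⟩
    first
    | omega
    | (intro h; exact hne (by simp [h]))

-- injecting String keys into Option String keys (Source B's key type)
def pvMapK {ν : Type} (d : PySem.Dict String ν) : PySem.Dict (Option String) ν :=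
  PySem.Dict.mk (d.items.map (fun p => (some p.1, p.2)))

theorem pvMapK_contains {ν : Type} (d : PySem.Dict String ν) (k : String) :
    (pvMapK d).contains (some k) = d.contains k := by
  simp [pvMapK, PySem.Dict.contains, List.any_map, Function.comp_def]

theorem pvMapK_get? {ν : Type} (d : PySem.Dict String ν) (k : String) :
    (pvMapK d).get? (some k) = d.get? k := by
  simp only [pvMapK, PySem.Dict.get?, List.find?_map]
  have hp : ((fun p : Option String × ν => p.1 == some k) ∘ fun p : String × ν => (some p.1, p.2))
      = (fun p => p.1 == k) := by
    funext p
    simp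
  rw [hp]
  cases List.find? (fun p => p.1 == k) d.items <;> rfl

theorem pvMapK_modify {ν : Type} (d : PySem.Dict String ν) (k : String) (v0 : ν) (f : ν → ν) :
    (pvMapK d).modify (some k) v0 f = pvMapK (d.modify k v0 f) := by
  have hget : (pvMapK d).getD (some k) v0 = d.getD k v0 := by
    simp [PySem.Dict.getD, pvMapK_get?]
  simp only [PySem.Dict.modify, hget]
  have hc := pvMapK_contains d k
  simp only [PySem.Dict.insert, hc]
  by_cases h : d.contains k = true
  · simp only [h, if_pos]
    apply PySem.Dict.ext
    simp only [pvMapK, List.map_map]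
    apply List.map_congr_left
    intro p _
    by_cases hk : p.1 = k <;> simp [hk]
  · simp only [h, Bool.false_eq_true, if_false]
    apply PySem.Dict.ext
    simp [pvMapK, List.map_append]

-- under Pre_ the Option-keyed group-by is the String-keyed one with injected keys
theorem groupO_eq (lvl : Int) (n : Nat)
    (hparse : ∀ c : String, 5 ≤ c.toList.length →
      parse_atc_level c lvl = some (String.mk (c.toList.take n)))
    (g : List String) (hg : ∀ c ∈ g, 5 ≤ c.toList.length) :
    pvGroupBO lvl g = pvMapK (pvGroupB n g) := by
  induction g using List.reverseRecOn with
  | nil => rfl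
  | append_singleton g c ih =>
      have hg' : ∀ x ∈ g, 5 ≤ x.toList.length := fun x hx => hg x (by simp [hx])
      have hc : 5 ≤ c.toList.length := hg c (by simp)
      rw [pvGroupBO, List.foldl_append, List.foldl_cons, List.foldl_nil,
        show g.foldl (fun out c => out.modify (parse_atc_level c lvl) [] (fun l => l ++ [c]))
            PySem.Dict.empty = pvGroupBO lvl g from rfl,
        ih hg', hparse c hc, pvMapK_modify, pvGroupB_snoc]

-- every member of a group came from the grouped list
theorem mem_of_mem_group (n : Nat) (g : List String) :
    ∀ p ∈ (pvGroupB n g).items, ∀ x ∈ p.2, x ∈ g := by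
  intro p hp x hx
  have hnd : (pvGroupB n g).keys.Nodup :=
    PySem.Dict.nodup_keys_foldl_modify_key g (fun c => String.mk (c.toList.take n)) []
      (fun _ c => fun l => l ++ [c]) PySem.Dict.empty PySem.Dict.nodup_keys_empty
  have hgd : (pvGroupB n g).getD p.1 [] = p.2 :=
    PySem.Dict.getD_of_mem_items _ (by simpa using hp) hnd []
  have hfold2 : pvGroupB n g
      = (g.map (fun c => (String.mk (c.toList.take n), c))).foldl
          (fun d q => d.modify q.1 [] (fun l => l ++ [q.2])) PySem.Dict.empty :=
    (List.foldl_map (f := fun c : String => (String.mk (c.toList.take n), c))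
      (g := fun (d : PySem.Dict String (List String)) (q : String × String) =>
        d.modify q.1 [] (fun l => l ++ [q.2]))
      (l := g) (init := (PySem.Dict.empty : PySem.Dict String (List String)))).symm
  have hchar : (pvGroupB n g).getD p.1 []
      = (((g.map (fun c => (String.mk (c.toList.take n), c))).filter
          (fun q => q.1 == p.1)).map (fun q => q.2)) := by
    rw [hfold2, PySem.Dict.getD_foldl_modify_append]
    simp
  rw [← hgd, hchar] at hx
  rw [List.mem_map] at hx
  obtain ⟨q, hqf, hqx⟩ := hx
  rw [List.mem_filter] at hqf
  rw [List.mem_map] at hqf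
  obtain ⟨⟨c, hcg, rfl⟩, _⟩ := hqf
  exact hqx ▸ hcg

-- the three marshalled-items equalities (leaf upward), each under Pre_'s length bound
theorem itemsO_eq4 (g : List String) (hg : ∀ c ∈ g, 5 ≤ c.toList.length) :
    (pvGroupBO 4 g).items.map (fun q => (pvKeyStr q.1, q.2)) = (pvB4 g).items := by
  rw [groupO_eq 4 5 (fun c h => (parse_eq c h).2.2.2) g hg]
  simp [pvMapK, pvB4, List.map_map, Function.comp_def, pvKeyStr]

theorem itemsO_eq3 (g : List String) (hg : ∀ c ∈ g, 5 ≤ c.toList.length) :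
    (pvGroupBO 3 g).items.map (fun p3 =>
      (pvKeyStr p3.1, (pvGroupBO 4 p3.2).items.map (fun q => (pvKeyStr q.1, q.2))))
    = (pvB3 g).items.map (fun p3 => (p3.1, p3.2.items)) := by
  rw [groupO_eq 3 4 (fun c h => (parse_eq c h).2.2.1) g hg]
  simp only [pvMapK, pvB3, pvMapV, List.map_map]
  apply List.map_congr_left
  intro p hp
  have hsub : ∀ c ∈ p.2, 5 ≤ c.toList.length :=
    fun c hc => hg c (mem_of_mem_group 4 g p hp c hc)
  simp only [Function.comp_def]
  rw [itemsO_eq4 p.2 hsub]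
  rfl

theorem itemsO_eq2 (g : List String) (hg : ∀ c ∈ g, 5 ≤ c.toList.length) :
    (pvGroupBO 2 g).items.map (fun p2 =>
      (pvKeyStr p2.1, (pvGroupBO 3 p2.2).items.map (fun p3 =>
        (pvKeyStr p3.1, (pvGroupBO 4 p3.2).items.map (fun q => (pvKeyStr q.1, q.2))))))
    = (pvB2 g).items.map (fun p2 => (p2.1, p2.2.items.map (fun p3 => (p3.1, p3.2.items)))) := by
  rw [groupO_eq 2 3 (fun c h => (parse_eq c h).2.1) g hg]
  simp only [pvMapK, pvB2, pvMapV, List.map_map]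
  apply List.map_congr_left
  intro p hp
  have hsub : ∀ c ∈ p.2, 5 ≤ c.toList.length :=
    fun c hc => hg c (mem_of_mem_group 3 g p hp c hc)
  simp only [Function.comp_def]
  rw [itemsO_eq3 p.2 hsub]
  simp only [pvB3, pvMapV, List.map_map]
  rfl

-- A's step on a code of length ≥ 5, rewritten as three nested modifies
theorem aStep_eq
    (h : PySem.Dict String (PySem.Dict String (PySem.Dict String (PySem.Dict String (List String)))))
    (c : String) (h5 : 5 ≤ c.toList.length) :
    (match parse_atc_level c 1, parse_atc_level c 2, parse_atc_level c 3, parse_atc_level c 4 with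
     | some l1, some l2, some l3, some l4 =>
       let l5 := c
       let h' := if h.contains l1 then h else h.insert l1 PySem.Dict.empty
       h'.modify l1 PySem.Dict.empty (fun d2 =>
         let d2' := if d2.contains l2 then d2 else d2.insert l2 PySem.Dict.empty
         d2'.modify l2 PySem.Dict.empty (fun d3 =>
           let d3' := if d3.contains l3 then d3 else d3.insert l3 PySem.Dict.empty
           d3'.modify l3 PySem.Dict.empty (fun d4 =>
             let d4' := if d4.contains l4 then d4 else d4.insert l4 []
             d4'.modify l4 [] (fun lst => lst ++ [l5]))))
     | _, _, _, _ => h)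
    = h.modify (String.mk (c.toList.take 1)) PySem.Dict.empty (fun d2 =>
        d2.modify (String.mk (c.toList.take 3)) PySem.Dict.empty (fun d3 =>
          d3.modify (String.mk (c.toList.take 4)) PySem.Dict.empty (fun d4 =>
            d4.modify (String.mk (c.toList.take 5)) [] (fun lst => lst ++ [c])))) := by
  obtain ⟨h1, h2, h3, h4⟩ := parse_eq c h5
  simp only [h1, h2, h3, h4]
  rw [insert_absent_modify]
  congr 1
  funext d2
  rw [insert_absent_modify]
  congr 1
  funext d3
  rw [insert_absent_modify]
  congr 1
  funext d4
  rw [insert_absent_modify]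

-- a fold whose body skips "" is the fold of the body over the filtered list
theorem foldl_skip_filter {σ : Type} (f : σ → String → σ) (init : σ) (l : List String) :
    l.foldl (fun s c => if c = "" then s else f s c) init
      = (l.filter (fun c => ¬ (c = ""))).foldl f init := by
  induction l generalizing init with
  | nil => rfl
  | cons c cs ih =>
      by_cases hc : c = ""
      · rw [List.foldl_cons]
        rw [if_pos hc, List.filter_cons, if_neg (by simp [hc])]
        exact ih init
      · rw [List.foldl_cons]
        rw [if_neg hc, List.filter_cons, if_pos (by simp [hc]), List.foldl_cons]
        exact ih (f init c)

-- folding A's step over a list of codes of length ≥ 5 is the nested group-by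
theorem aFold_eq (codes : List String)
    (hall : ∀ c ∈ codes, 5 ≤ c.toList.length) :
    codes.foldl
      (fun h code =>
        match parse_atc_level code 1, parse_atc_level code 2,
              parse_atc_level code 3, parse_atc_level code 4 with
        | some l1, some l2, some l3, some l4 =>
          let l5 := code
          let h' := if h.contains l1 then h else h.insert l1 PySem.Dict.empty
          h'.modify l1 PySem.Dict.empty (fun d2 =>
            let d2' := if d2.contains l2 then d2 else d2.insert l2 PySem.Dict.empty
            d2'.modify l2 PySem.Dict.empty (fun d3 =>
              let d3' := if d3.contains l3 then d3 else d3.insert l3 PySem.Dict.empty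
              d3'.modify l3 PySem.Dict.empty (fun d4 =>
                let d4' := if d4.contains l4 then d4 else d4.insert l4 []
                d4'.modify l4 [] (fun lst => lst ++ [l5]))))
        | _, _, _, _ => h)
      PySem.Dict.empty
    = pvMapV (pvGroupB 1 codes) pvB2 := by
  rw [PySem.List.foldl_congr_mem codes _ _ _ (fun h c hc => aStep_eq h c (hall c hc))]
  exact pvFoldLevel 1 PySem.Dict.empty
    (fun c d2 => d2.modify (String.mk (c.toList.take 3)) PySem.Dict.empty
      (fun d3 => d3.modify (String.mk (c.toList.take 4)) PySem.Dict.empty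
        (fun d4 => d4.modify (String.mk (c.toList.take 5)) [] (fun lst => lst ++ [c]))))
    pvB2 rfl (fun g c => pvB2_snoc g c) codes

-- ===== VERDICT (by name: the statement is the Claim_ definition above) =====
theorem get_atc_hierarchy_dict_spec : Claim_equal_get_atc_hierarchy_dict := by
  intro atc_codes _ hpre
  unfold Spec_get_atc_hierarchy_dict get_atc_hierarchy_dict get_atc_hierarchy_dict_alt
  have hfold :
      atc_codes.foldl
        (fun h code =>
          if code = "" then h
          else
            match parse_atc_level code 1, parse_atc_level code 2,
                  parse_atc_level code 3, parse_atc_level code 4 with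
            | some l1, some l2, some l3, some l4 =>
              let l5 := code
              let h' := if h.contains l1 then h else h.insert l1 PySem.Dict.empty
              h'.modify l1 PySem.Dict.empty (fun d2 =>
                let d2' := if d2.contains l2 then d2 else d2.insert l2 PySem.Dict.empty
                d2'.modify l2 PySem.Dict.empty (fun d3 =>
                  let d3' := if d3.contains l3 then d3 else d3.insert l3 PySem.Dict.empty
                  d3'.modify l3 PySem.Dict.empty (fun d4 =>
                    let d4' := if d4.contains l4 then d4 else d4.insert l4 []
                    d4'.modify l4 [] (fun lst => lst ++ [l5]))))
            | _, _, _, _ => h)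
        PySem.Dict.empty
      = pvMapV (pvGroupB 1 (atc_codes.filter (fun c => ¬ (c = "")))) pvB2 := by
    rw [foldl_skip_filter]
    exact aFold_eq (atc_codes.filter (fun c => ¬ (c = "")))
      (by
        intro c hc
        rw [List.mem_filter] at hc
        have h1 : ¬ c = "" := by simpa using hc.2
        rcases hpre c hc.1 with h | h
        · exact absurd h h1
        · exact h)
  have hall' : ∀ c ∈ atc_codes.filter (fun c => ¬ (c = "")), 5 ≤ c.toList.length := by
    intro c hc
    rw [List.mem_filter] at hc
    have h1 : ¬ c = "" := by simpa using hc.2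
    rcases hpre c hc.1 with h | h
    · exact absurd h h1
    · exact h
  rw [hfold]
  dsimp only
  rw [groupO_eq 1 1 (fun c h => (parse_eq c h).1) _ hall']
  simp only [pvMapK, pvMapV, List.map_map]
  apply List.map_congr_left
  intro p hp
  have hsub : ∀ c ∈ p.2, 5 ≤ c.toList.length :=
    fun c hc => hall' c (mem_of_mem_group 1 _ p hp c hc)
  simp only [Function.comp_def]
  rw [itemsO_eq2 p.2 hsub]
  simp only [pvB2, pvMapV, List.map_map]
  rfl
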